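-- pv_equiv track=rewrite | github.com/jJup0/LeetCode | Medium/3572. Maximize Y‑Sum by Picking a Triplet of Distinct X‑Values.py | maxSumDistinctTriplet
-- ===== SOURCE A (Python) =====
-- def maxSumDistinctTriplet(x: list[int], y: list[int]) -> int:
--     """
--     Complexity:
--         Time: O(n * log(n))
--         Space: O(n)
--     """
--     ys = sorted(((num, i) for i, num in enumerate(y)), reverse=True)
--     # values in x current being used for bigest triplet
--     biggest_x_vals: list[int] = []
--     y_triplet: list[int] = []
--     for num, i in ys:
--         # if value in x is already in use, continue
--         if x[i] in biggest_x_vals: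
--             continue
--         # otherwise use the current y-value in triplet
--         y_triplet.append(num)
--         biggest_x_vals.append(x[i])
--         if len(y_triplet) == 3:
--             # triplet is full, we can break
--             break
--     if len(y_triplet) < 3:
--         # there are less than 3 unique numbers in x, no triplet can be formed
--         return -1
--     return sum(y_triplet)
-- ===== SOURCE B (Python) =====
-- def maxSumDistinctTriplet(x: list[int], y: list[int]) -> int:
--     # best y per distinct x-value in one pass over zip(x,y); then sort only the distinct maxima
--     best: dict[int, int] = {}
--     for xv, yv in zip(x, y):
--         prev = best.get(xv)
--         if prev is None or prev < yv:
--             best[xv] = yv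
--     vals = sorted(best.values(), reverse=True)
--     if len(vals) < 3:
--         return -1
--     return vals[0] + vals[1] + vals[2]
-- ===== Notes on version B (the rewrite author's own statement) =====
-- stated objective: alternative
-- what changed: Instead of sorting all n (y,i) pairs and greedily scanning with a list-membership test, B builds a dict x->max y in a single pass over zip(x,y) and sorts only the k distinct maxima, summing the top three.
-- outside the precondition, e.g. on maxSumDistinctTriplet([1, 2, 3], [10, 9, 8, 0, 0]): A returns 27, B returns 27; on maxSumDistinctTriplet([1], [5, 6]): A raises IndexError, B returns -1
import Mathlib
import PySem

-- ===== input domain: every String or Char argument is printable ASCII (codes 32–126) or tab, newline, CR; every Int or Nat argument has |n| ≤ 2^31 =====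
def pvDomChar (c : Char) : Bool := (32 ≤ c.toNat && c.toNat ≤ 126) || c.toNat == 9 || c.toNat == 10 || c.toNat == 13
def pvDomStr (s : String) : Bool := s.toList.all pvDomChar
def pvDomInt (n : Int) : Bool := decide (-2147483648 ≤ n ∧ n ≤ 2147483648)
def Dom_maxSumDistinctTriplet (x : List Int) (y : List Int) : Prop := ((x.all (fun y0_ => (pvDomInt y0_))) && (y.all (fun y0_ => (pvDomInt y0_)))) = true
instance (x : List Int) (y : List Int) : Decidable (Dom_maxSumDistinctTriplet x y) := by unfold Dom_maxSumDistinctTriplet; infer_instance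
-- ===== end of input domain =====

-- B replaces A's full sort of all (y,i) pairs + greedy membership scan by a one-pass dict x->max y
-- over zip(x,y) followed by sorting only the distinct maxima (objective: alternative algorithm).


-- ===== PORT A =====
-- ys = sorted(((num, i) for i, num in enumerate(y)), reverse=True)
def pvPairsA (y : List Int) : List (Int × Int) :=
  (PySem.List.enumerate y).map (fun p => (p.2, p.1))

-- the 'for num, i in ys' loop with its early break at len(y_triplet) == 3;
-- x[i] is ported as pyGetD (Pre_ keeps every used index in range)
def pvLoopA (x : List Int) : List (Int × Int) → List Int → List Int → List Int
  | [], _, t => t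
  | (num, i) :: rest, bx, t =>
      if PySem.List.pyGetD x i 0 ∈ bx then pvLoopA x rest bx t
      else if (t ++ [num]).length = 3 then t ++ [num]
      else pvLoopA x rest (bx ++ [PySem.List.pyGetD x i 0]) (t ++ [num])

def maxSumDistinctTriplet (x : List Int) (y : List Int) : Int :=
  let ys := PySem.List.sorted2 (pvPairsA y) (fun p => p.1) (fun p => p.2) true
  let t := pvLoopA x ys [] []
  if t.length < 3 then -1 else t.sum

-- ===== PORT B =====
-- body of B's 'for xv, yv in zip(x, y)' loop
def pvStepB (d : PySem.Dict Int Int) (p : Int × Int) : PySem.Dict Int Int :=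
  match d.get? p.1 with
  | none => d.insert p.1 p.2
  | some prev => if prev < p.2 then d.insert p.1 p.2 else d

def maxSumDistinctTriplet_alt (x : List Int) (y : List Int) : Int :=
  let best := (x.zip y).foldl pvStepB PySem.Dict.empty
  let vals := PySem.List.sorted best.values (fun v => v) true
  if vals.length < 3 then -1
  else PySem.List.pyGetD vals 0 0 + PySem.List.pyGetD vals 1 0 + PySem.List.pyGetD vals 2 0

-- ===== PRECONDITION & SPEC =====
-- A reads x[i] for indices i of y; Pre_ excludes y longer than x, on which A in general raises
-- IndexError (on a few such inputs A happens to break before reaching a bad index and still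
-- returns — see the cites in the claim; B agrees with A there anyway).
def Pre_maxSumDistinctTriplet (x : List Int) (y : List Int) : Prop := y.length ≤ x.length
instance (x : List Int) (y : List Int) : Decidable (Pre_maxSumDistinctTriplet x y) := by unfold Pre_maxSumDistinctTriplet; infer_instance

def pvWitness_maxSumDistinctTriplet : List Int × List Int := ([1, 2, 3], [10, 9, 8])

def Spec_maxSumDistinctTriplet (x : List Int) (y : List Int) (out : Int) : Prop := out = maxSumDistinctTriplet_alt x y
instance (x : List Int) (y : List Int) (out : Int) : Decidable (Spec_maxSumDistinctTriplet x y out) := by unfold Spec_maxSumDistinctTriplet; infer_instance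

-- ===== CLAIM (what is proved, stated in full; the proofs are below) =====
def Claim_equal_maxSumDistinctTriplet : Prop := ∀ (x : List Int) (y : List Int), Dom_maxSumDistinctTriplet x y → Pre_maxSumDistinctTriplet x y → Spec_maxSumDistinctTriplet x y (maxSumDistinctTriplet x y)

-- ===== LEMMAS AND PROOFS =====

def pvLexGE (a b : Int × Int) : Prop := b.1 < a.1 ∨ (b.1 = a.1 ∧ b.2 ≤ a.2)
def pvBef (a b : Int × Int) : Bool :=
  decide (b.1 < a.1) || (!decide (a.1 < b.1) && decide (b.2 < a.2))
lemma pvLexGE_trans {a b c : Int × Int} (h1 : pvLexGE a b) (h2 : pvLexGE b c) : pvLexGE a c := by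
  unfold pvLexGE at *; omega
lemma pvBef_true {a b : Int × Int} (h : pvBef a b = true) : pvLexGE a b := by
  unfold pvBef at h; unfold pvLexGE; simp at h; omega
lemma pvBef_false {a b : Int × Int} (h : pvBef a b = false) : pvLexGE b a := by
  unfold pvBef at h; unfold pvLexGE; simp at h; omega

lemma pvInsertBy_pairwise (q : Int × Int) (l : List (Int × Int)) (h : l.Pairwise pvLexGE) :
    (PySem.List.insertBy pvBef q l).Pairwise pvLexGE := by
  induction l with
  | nil => simp [PySem.List.insertBy.eq_1]
  | cons y ys ih =>
    rw [PySem.List.insertBy.eq_2]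
    rcases List.pairwise_cons.mp h with ⟨hy, hys⟩
    by_cases hb : pvBef q y = true
    · simp only [hb, if_true]
      refine List.pairwise_cons.mpr ⟨?_, h⟩
      intro z hz
      rcases List.mem_cons.mp hz with rfl | hz
      · exact pvBef_true hb
      · exact pvLexGE_trans (pvBef_true hb) (hy z hz)
    · simp only [hb]
      refine List.pairwise_cons.mpr ⟨?_, ih hys⟩
      intro z hz
      rcases (PySem.List.mem_insertBy pvBef q z ys).mp hz with rfl | hz
      · exact pvBef_false (Bool.eq_false_iff.mpr hb)
      · exact hy z hz

lemma pvFoldl_pairwise (E acc : List (Int × Int)) (h : acc.Pairwise pvLexGE) :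
    (E.foldl (fun acc q => PySem.List.insertBy pvBef q acc) acc).Pairwise pvLexGE := by
  induction E generalizing acc with
  | nil => exact h
  | cons q rest ih => exact ih _ (pvInsertBy_pairwise q acc h)

def pvFirsts (x : List Int) : List (Int × Int) → List Int → List Int
  | [], _ => []
  | (num, i) :: rest, seen =>
      if PySem.List.pyGetD x i 0 ∈ seen then pvFirsts x rest seen
      else num :: pvFirsts x rest (seen ++ [PySem.List.pyGetD x i 0])
lemma pvLoopA_eq_firsts (x : List Int) (l : List (Int × Int)) (bx t : List Int)
    (h : t.length < 3) : pvLoopA x l bx t = t ++ (pvFirsts x l bx).take (3 - t.length) := by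
  induction l generalizing bx t with
  | nil => simp [pvLoopA, pvFirsts]
  | cons q rest ih =>
    obtain ⟨num, i⟩ := q
    rw [pvLoopA, pvFirsts]
    by_cases hm : PySem.List.pyGetD x i 0 ∈ bx
    · simp only [hm, if_true]; exact ih bx t h
    · simp only [hm, if_false]
      by_cases h3 : (t ++ [num]).length = 3
      · simp only [h3, if_true]
        have ht : 3 - t.length = 0 + 1 := by simp at h3; omega
        rw [ht, List.take_succ_cons, List.take_zero]
      · simp only [h3, if_false]
        have hlt : (t ++ [num]).length < 3 := by simp at h3 ⊢; omega
        rw [ih _ _ hlt]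
        have : 3 - t.length = (3 - (t ++ [num]).length) + 1 := by simp at h3 ⊢; omega
        rw [this, List.take_succ_cons, List.append_assoc]
        rfl

def pvG (x : List Int) (p : Int × Int) : Int × Int := (PySem.List.pyGetD x p.2 0, p.1)
def pvFirstsW : List (Int × Int) → List Int → List (Int × Int)
  | [], _ => []
  | q :: rest, seen =>
      if q.1 ∈ seen then pvFirstsW rest seen
      else q :: pvFirstsW rest (seen ++ [q.1])
def pvMaxY (Z : List (Int × Int)) (v : Int) : Int :=
  (((Z.filter (fun q => q.1 == v)).map (fun q => q.2)).max?).getD 0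

lemma pvFirsts_eq_map (x : List Int) (l : List (Int × Int)) (seen : List Int) :
    pvFirsts x l seen = (pvFirstsW (l.map (pvG x)) seen).map (fun p => p.2) := by
  induction l generalizing seen with
  | nil => simp [pvFirsts, pvFirstsW]
  | cons q rest ih =>
    obtain ⟨num, i⟩ := q
    rw [pvFirsts, List.map_cons, pvFirstsW]
    by_cases hm : PySem.List.pyGetD x i 0 ∈ seen
    · simp only [pvG, hm, if_true]; exact ih seen
    · simp only [pvG, hm, if_false, List.map_cons]
      rw [ih]

lemma pvFirstsW_sublist (W : List (Int × Int)) (seen : List Int) : (pvFirstsW W seen).Sublist W := by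
  induction W generalizing seen with
  | nil => simp [pvFirstsW]
  | cons q rest ih =>
    rw [pvFirstsW]
    by_cases hm : q.1 ∈ seen
    · simp only [hm, if_true]; exact (ih seen).trans (List.sublist_cons_self q rest)
    · simp only [hm, if_false]; exact (ih _).cons₂ q

lemma pvFirstsW_mem_fst (W : List (Int × Int)) (seen : List Int) (v : Int) :
    v ∈ (pvFirstsW W seen).map (fun p => p.1) ↔ v ∈ W.map (fun p => p.1) ∧ v ∉ seen := by
  induction W generalizing seen with
  | nil => simp [pvFirstsW]
  | cons q rest ih =>
    rw [pvFirstsW]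
    by_cases hm : q.1 ∈ seen
    · simp only [hm, if_true, List.map_cons, List.mem_cons]
      rw [ih]
      constructor
      · rintro ⟨h1, h2⟩; exact ⟨Or.inr h1, h2⟩
      · rintro ⟨h1 | h1, h2⟩
        · subst h1; exact absurd hm h2
        · exact ⟨h1, h2⟩
    · simp only [hm, if_false, List.map_cons, List.mem_cons]
      rw [ih]
      constructor
      · rintro (rfl | ⟨h1, h2⟩)
        · exact ⟨Or.inl rfl, hm⟩
        · simp at h2; exact ⟨Or.inr h1, h2.1⟩
      · rintro ⟨h1 | h1, h2⟩
        · exact Or.inl h1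
        · by_cases hv : v = q.1
          · exact Or.inl hv
          · exact Or.inr ⟨h1, by simp [h2, hv]⟩

lemma pvFirstsW_nodup (W : List (Int × Int)) (seen : List Int) (h : seen.Nodup) :
    (seen ++ (pvFirstsW W seen).map (fun p => p.1)).Nodup := by
  induction W generalizing seen with
  | nil => simpa [pvFirstsW]
  | cons q rest ih =>
    rw [pvFirstsW]
    by_cases hm : q.1 ∈ seen
    · simp only [hm, if_true]; exact ih seen h
    · simp only [hm, if_false, List.map_cons]
      have := ih (seen ++ [q.1]) (by simp [List.nodup_append, h]; intro a ha he; subst he; exact hm ha)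
      rw [List.append_assoc] at this; simpa using this

lemma pvMax_cons_getD (a : Int) (L : List Int) (h : ∀ b ∈ L, b ≤ a) :
    ((a :: L).max?).getD 0 = a := by
  have : (a :: L).max? = some a := by
    rw [List.max?_eq_some_iff]
    exact ⟨List.mem_cons_self, by intro b hb; rcases List.mem_cons.mp hb with rfl | hb; exact le_refl _; exact h b hb⟩
  rw [this]; rfl

lemma pvFirstsW_max (W : List (Int × Int)) (seen : List Int)
    (hp : W.Pairwise (fun a b => b.2 ≤ a.2)) (p : Int × Int) (hm : p ∈ pvFirstsW W seen) :
    p.2 = pvMaxY W p.1 := by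
  induction W generalizing seen with
  | nil => simp [pvFirstsW] at hm
  | cons q rest ih =>
    rcases List.pairwise_cons.mp hp with ⟨hq, hrest⟩
    rw [pvFirstsW] at hm
    by_cases hs : q.1 ∈ seen
    · simp only [hs, if_true] at hm
      have hne : p.1 ≠ q.1 := by
        have := (pvFirstsW_mem_fst rest seen p.1).mp (List.mem_map_of_mem hm)
        intro he; rw [he] at this; exact this.2 hs
      rw [ih seen hrest hm]
      unfold pvMaxY
      rw [List.filter_cons]
      simp [Ne.symm hne]
    · simp only [hs, if_false] at hm
      rcases List.mem_cons.mp hm with rfl | hm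
      · -- p = q : p.2 is the max
        unfold pvMaxY
        rw [List.filter_cons]
        simp only [beq_self_eq_true, if_true]
        have hall : ∀ b ∈ (List.filter (fun q' => q'.1 == p.1) rest).map (fun q' => q'.2), b ≤ p.2 := by
          intro b hb
          simp only [List.mem_map, List.mem_filter] at hb
          obtain ⟨z, ⟨hz, _⟩, rfl⟩ := hb
          exact hq z hz
        rw [List.map_cons]
        exact (pvMax_cons_getD p.2 _ hall).symm
      · have hne : p.1 ≠ q.1 := by
          have := (pvFirstsW_mem_fst rest (seen ++ [q.1]) p.1).mp (List.mem_map_of_mem hm)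
          intro he; exact this.2 (by simp [he])
        rw [ih _ hrest hm]
        unfold pvMaxY
        rw [List.filter_cons]
        simp [Ne.symm hne]

lemma pvMapG_zip (x y : List Int) (h : y.length ≤ x.length) :
    (pvPairsA y).map (pvG x) = x.zip y := by
  apply List.ext_getElem
  · simp [pvPairsA, PySem.List.length_enumerate, List.length_zip]; omega
  · intro k h1 h2
    simp only [pvPairsA, List.map_map, List.getElem_map, List.getElem_zip]
    have hk : k < y.length := by
      simpa [pvPairsA, PySem.List.length_enumerate] using h1
    rw [PySem.List.getElem_enumerate]
    simp only [Function.comp, pvG]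
    have hx : k < x.length := lt_of_lt_of_le hk h
    have : PySem.List.pyGetD x ((0 : Int) + (k : Int)) 0 = x[k] := by
      rw [zero_add, PySem.List.pyGetD_natCast]
      exact List.getD_eq_getElem x 0 hx
    rw [this]

lemma pvPerm_max? (l l' : List Int) (h : l.Perm l') : l.max? = l'.max? := by
  cases hl : l.max? with
  | none =>
    rw [List.max?_eq_none_iff] at hl
    subst hl
    rw [List.max?_eq_none_iff.mpr (List.Perm.nil_eq h).symm]
  | some a =>
    rw [List.max?_eq_some_iff] at hl
    symm
    rw [List.max?_eq_some_iff]
    exact ⟨h.mem_iff.mp hl.1, fun b hb => hl.2 b (h.mem_iff.mpr hb)⟩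

lemma pvMaxY_perm {W Z : List (Int × Int)} (h : W.Perm Z) (v : Int) : pvMaxY W v = pvMaxY Z v := by
  unfold pvMaxY
  rw [pvPerm_max? _ _ ((h.filter _).map _)]

def pvKeys (Z : List (Int × Int)) : List Int := PySem.List.dedup (Z.map (fun q => q.1))
lemma pvMax_append_getD (L : List Int) (a prev : Int) (h : L.max? = some prev) :
    ((L ++ [a]).max?).getD 0 = max prev a := by
  rw [List.max?_eq_some_iff] at h
  have : (L ++ [a]).max? = some (max prev a) := by
    rw [List.max?_eq_some_iff]
    constructor
    · rcases le_total a prev with hle | hle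
      · rw [max_eq_left hle]; exact List.mem_append_left _ h.1
      · rw [max_eq_right hle]; exact List.mem_append_right _ (List.mem_singleton_self a)
    · intro b hb
      rcases List.mem_append.mp hb with hb | hb
      · exact le_trans (h.2 b hb) (le_max_left _ _)
      · rw [List.mem_singleton.mp hb]; exact le_max_right _ _
  rw [this]; rfl

-- filter/keys facts
lemma pvKeys_append_mem (Z : List (Int × Int)) (q : Int × Int) (h : q.1 ∈ Z.map (fun p => p.1)) :
    pvKeys (Z ++ [q]) = pvKeys Z := by
  unfold pvKeys
  rw [List.map_append, List.map_singleton]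
  simp only [PySem.List.dedup_eq_ofList, PySem.Set.ofList_append_singleton]
  exact PySem.Set.add_of_mem (by simpa [PySem.Set.mem_ofList] using h)

lemma pvKeys_append_not_mem (Z : List (Int × Int)) (q : Int × Int) (h : q.1 ∉ Z.map (fun p => p.1)) :
    pvKeys (Z ++ [q]) = pvKeys Z ++ [q.1] := by
  unfold pvKeys
  rw [List.map_append, List.map_singleton]
  simp only [PySem.List.dedup_eq_ofList, PySem.Set.ofList_append_singleton]
  exact PySem.Set.add_of_not_mem (by simpa [PySem.Set.mem_ofList] using h)

lemma pvMaxY_append_ne (Z : List (Int × Int)) (q : Int × Int) (v : Int) (h : v ≠ q.1) :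
    pvMaxY (Z ++ [q]) v = pvMaxY Z v := by
  unfold pvMaxY
  rw [List.filter_append]
  simp [Ne.symm h]

lemma pvMaxY_append_self (Z : List (Int × Int)) (q : Int × Int) (prev : Int)
    (h : pvMaxY Z q.1 = prev) (hm : q.1 ∈ Z.map (fun p => p.1)) :
    pvMaxY (Z ++ [q]) q.1 = max prev q.2 := by
  unfold pvMaxY at *
  rw [List.filter_append, List.map_append]
  simp only [List.filter_cons, beq_self_eq_true, if_true, List.filter_nil, List.map_singleton]
  have hne : (Z.filter (fun p => p.1 == q.1)).map (fun p => p.2) ≠ [] := by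
    simp only [ne_eq, List.map_eq_nil_iff, List.filter_eq_nil_iff]
    intro hc
    rcases List.mem_map.mp hm with ⟨z, hz, he⟩
    exact absurd (by simp [he]) (hc z hz)
  obtain ⟨m, hm'⟩ := Option.ne_none_iff_exists'.mp (mt List.max?_eq_none_iff.mp hne)
  rw [pvMax_append_getD _ _ _ hm']
  rw [hm'] at h
  simp at h; omega

lemma pvMaxY_append_fresh (Z : List (Int × Int)) (q : Int × Int)
    (h : q.1 ∉ Z.map (fun p => p.1)) : pvMaxY (Z ++ [q]) q.1 = q.2 := by
  unfold pvMaxY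
  have hz : Z.filter (fun p => p.1 == q.1) = [] := by
    rw [List.filter_eq_nil_iff]
    intro z hz hc
    exact h (List.mem_map.mpr ⟨z, hz, by simpa using hc⟩)
  rw [List.filter_append, hz]
  simp

lemma pvItems_maxfold (Z : List (Int × Int)) :
    (Z.foldl pvStepB PySem.Dict.empty).items = (pvKeys Z).map (fun v => (v, pvMaxY Z v)) := by
  induction Z using List.reverseRecOn with
  | nil => simp [pvKeys, pvMaxY]; rfl
  | append_singleton Z q IH =>
    rw [List.foldl_append, List.foldl_cons, List.foldl_nil]
    set d := Z.foldl pvStepB PySem.Dict.empty with hd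
    have hkeys : d.keys = pvKeys Z := by
      show d.items.map (fun p => p.1) = pvKeys Z
      rw [IH, List.map_map]
      simp [Function.comp_def]
    have hnd : d.keys.Nodup := by rw [hkeys]; unfold pvKeys; simp
    by_cases hmem : q.1 ∈ Z.map (fun p => p.1)
    · -- key already present
      have hk : q.1 ∈ pvKeys Z := by unfold pvKeys; simp [hmem]
      have hitem : (q.1, pvMaxY Z q.1) ∈ d.items := by
        rw [IH]; exact List.mem_map.mpr ⟨q.1, hk, rfl⟩
      have hget : d.get? q.1 = some (pvMaxY Z q.1) := PySem.Dict.get?_of_mem_items d hitem hnd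
      have hcont : d.contains q.1 = true := by
        rw [PySem.Dict.contains_iff_mem_keys, hkeys]; exact hk
      rw [pvStepB, hget]
      rw [pvKeys_append_mem Z q hmem]
      by_cases hlt : pvMaxY Z q.1 < q.2
      · simp only [hlt, if_true]
        rw [PySem.Dict.items_insert_of_contains d q.2 hcont, IH, List.map_map]
        apply List.map_congr_left
        intro v hv
        by_cases hvq : v = q.1
        · subst hvq
          simp only [Function.comp, beq_self_eq_true, if_true]
          rw [pvMaxY_append_self Z q _ rfl hmem]
          have : max (pvMaxY Z q.1) q.2 = q.2 := by omega
          rw [this]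
        · simp only [Function.comp, beq_iff_eq, hvq, if_false]
          rw [pvMaxY_append_ne Z q v hvq]
      · simp only [hlt, if_false]
        rw [IH]
        apply List.map_congr_left
        intro v hv
        by_cases hvq : v = q.1
        · subst hvq
          rw [pvMaxY_append_self Z q _ rfl hmem]
          have : max (pvMaxY Z q.1) q.2 = pvMaxY Z q.1 := by omega
          rw [this]
        · rw [pvMaxY_append_ne Z q v hvq]
    · -- fresh key
      have hk : q.1 ∉ pvKeys Z := by unfold pvKeys; simp [hmem]
      have hget : d.get? q.1 = none := by
        rw [PySem.Dict.get?_eq_none_iff_not_mem_keys, hkeys]; exact hk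
      have hcont : d.contains q.1 = false := by
        rw [Bool.eq_false_iff, ne_eq, PySem.Dict.contains_iff_mem_keys, hkeys]; exact hk
      rw [pvStepB, hget]
      rw [PySem.Dict.items_insert_of_not_contains d q.2 hcont, IH]
      rw [pvKeys_append_not_mem Z q hmem, List.map_append, List.map_singleton]
      congr 1
      · apply List.map_congr_left
        intro v hv
        have hvq : v ≠ q.1 := fun he => hk (he ▸ hv)
        rw [pvMaxY_append_ne Z q v hvq]
      · rw [pvMaxY_append_fresh Z q hmem]

lemma pvSorted2_eq (E : List (Int × Int)) :
    PySem.List.sorted2 E (fun p => p.1) (fun p => p.2) true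
      = E.foldl (fun acc q => PySem.List.insertBy pvBef q acc) [] := rfl

lemma pvSorted2_pairwise (E : List (Int × Int)) :
    (PySem.List.sorted2 E (fun p => p.1) (fun p => p.2) true).Pairwise pvLexGE := by
  rw [pvSorted2_eq]
  exact pvFoldl_pairwise E [] (by simp)

-- ===== VERDICT (by name: the statement is the Claim_ definition above) =====
theorem maxSumDistinctTriplet_spec : Claim_equal_maxSumDistinctTriplet := by
  intro x y _ hpre
  unfold Spec_maxSumDistinctTriplet maxSumDistinctTriplet maxSumDistinctTriplet_alt
  dsimp only
  set ys := PySem.List.sorted2 (pvPairsA y) (fun p => p.1) (fun p => p.2) true with hys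
  set W := ys.map (pvG x) with hW
  set Z := x.zip y with hZ
  -- B's dict values
  have hvals : (Z.foldl pvStepB PySem.Dict.empty).values = (pvKeys Z).map (pvMaxY Z) := by
    show (Z.foldl pvStepB PySem.Dict.empty).items.map (fun p => p.2) = _
    rw [pvItems_maxfold, List.map_map]
    rfl
  set vals := PySem.List.sorted ((Z.foldl pvStepB PySem.Dict.empty).values) (fun v => v) true with hvalsdef
  -- A's greedy list
  have hloop : pvLoopA x ys [] [] = (pvFirsts x ys []).take 3 := by
    rw [pvLoopA_eq_firsts x ys [] [] (by simp)]
    simp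
  set F := pvFirsts x ys [] with hF
  -- W is a permutation of Z
  have hperm : W.Perm Z := by
    have h1 : (pvPairsA y).map (pvG x) = Z := pvMapG_zip x y hpre
    have h2 := (PySem.List.sorted2_perm (pvPairsA y) (fun p => p.1) (fun p => p.2) true).map (pvG x)
    rw [h1] at h2
    exact h2
  -- W is sorted descending in the y-component
  have hWpair : W.Pairwise (fun a b => b.2 ≤ a.2) := by
    rw [hW, List.pairwise_map]
    apply List.Pairwise.imp ?_ (pvSorted2_pairwise (pvPairsA y))
    intro a b hab
    unfold pvLexGE at hab
    unfold pvG
    dsimp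
    omega
  -- F as firsts of W
  have hFW : F = (pvFirstsW W []).map (fun p => p.2) := pvFirsts_eq_map x ys []
  -- F is a non-increasing list
  have hFpair : F.Pairwise (fun a b : Int => b ≤ a) := by
    rw [hFW]
    exact List.Pairwise.sublist ((pvFirstsW_sublist W []).map _)
      (by rw [List.pairwise_map]; exact hWpair)
  -- each collected pair carries the max of its key
  have hmax : ∀ p ∈ pvFirstsW W [], p.2 = pvMaxY Z p.1 := by
    intro p hp
    rw [pvFirstsW_max W [] hWpair p hp]
    exact pvMaxY_perm hperm p.1
  -- the collected keys are a permutation of Z's distinct keys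
  have hkeysperm : ((pvFirstsW W []).map (fun p => p.1)).Perm (pvKeys Z) := by
    apply (List.perm_ext_iff_of_nodup ?_ ?_).mpr
    · intro v
      rw [pvFirstsW_mem_fst W [] v]
      unfold pvKeys
      simp only [PySem.List.mem_dedup, List.not_mem_nil, not_false_iff, and_true]
      constructor
      · intro hv; exact ((hperm.map (fun p => p.1)).mem_iff).mp hv
      · intro hv; exact ((hperm.map (fun p => p.1)).mem_iff).mpr hv
    · have := pvFirstsW_nodup W [] (List.nodup_nil)
      simpa using this
    · unfold pvKeys; exact PySem.List.nodup_dedup _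
  -- F is a permutation of the distinct maxima
  have hFperm : F.Perm ((pvKeys Z).map (pvMaxY Z)) := by
    rw [hFW]
    have h1 : (pvFirstsW W []).map (fun p => p.2)
        = ((pvFirstsW W []).map (fun p => p.1)).map (pvMaxY Z) := by
      rw [List.map_map]
      exact List.map_congr_left (fun p hp => hmax p hp)
    rw [h1]
    exact hkeysperm.map _
  -- hence F is exactly B's sorted list of maxima
  have hFvals : F = vals := by
    apply List.Perm.eq_of_pairwise (le := fun a b : Int => b ≤ a)
      (fun a b _ _ h1 h2 => le_antisymm h2 h1) hFpair
      (by rw [hvalsdef]; exact PySem.List.sorted_pairwise_rev _ _)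
      (by rw [hvalsdef, hvals]; exact hFperm.trans (PySem.List.sorted_perm _ _ true).symm)
  -- finish: compare the two results
  rw [hloop, ← hFvals]
  by_cases hlen : F.length < 3
  · rw [if_pos (by rw [List.length_take]; omega), if_pos hlen]
  · rw [if_neg (by rw [List.length_take]; omega), if_neg hlen]
    obtain ⟨a, b, c, r, hFeq⟩ : ∃ a b c r, F = a :: b :: c :: r := by
      clear hloop hFW hFpair hFperm hFvals hF
      rcases F with _ | ⟨a, _ | ⟨b, _ | ⟨c, r⟩⟩⟩
      · simp at hlen
      · simp at hlen
      · simp at hlen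
      · exact ⟨a, b, c, r, rfl⟩
    rw [hFeq]
    rw [PySem.List.pyGetD_ofNat' _ 0, PySem.List.pyGetD_ofNat' _ 1, PySem.List.pyGetD_ofNat' _ 2]
    simp
    ring
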